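-- pv_equiv track=rewrite | github.com/sbc806/RumHKNet_files | data_splits/check_overlap.py | get_minimum_sequence_data
-- ===== SOURCE A (Python) =====
-- def get_minimum_sequence_data(fasta_data):
--     fasta_individual_minimum = fasta_data[0]
--     minimum_sequence_size = len(fasta_individual_minimum["seq"])
--     for i in range(1, len(fasta_data)):
--         fasta_individual_current = fasta_data[i]
--         current_sequence_size = len(fasta_individual_current["seq"])
--         if current_sequence_size < minimum_sequence_size:
--             fasta_individual_minimum = fasta_individual_current
--             minimum_sequence_size = current_sequence_size
--     return fasta_individual_minimum
-- ===== SOURCE B (Python) =====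
-- def get_minimum_sequence_data(fasta_data):
--     return sorted(fasta_data, key=lambda entry: len(entry["seq"]))[0]
-- ===== Notes on version B (the rewrite author's own statement) =====
-- stated objective: idiomatic
-- what changed: Replaces the manual index-loop min-scan with a stable sort by sequence length followed by taking the first element (first-on-tie preserved by sort stability).
import Mathlib
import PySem

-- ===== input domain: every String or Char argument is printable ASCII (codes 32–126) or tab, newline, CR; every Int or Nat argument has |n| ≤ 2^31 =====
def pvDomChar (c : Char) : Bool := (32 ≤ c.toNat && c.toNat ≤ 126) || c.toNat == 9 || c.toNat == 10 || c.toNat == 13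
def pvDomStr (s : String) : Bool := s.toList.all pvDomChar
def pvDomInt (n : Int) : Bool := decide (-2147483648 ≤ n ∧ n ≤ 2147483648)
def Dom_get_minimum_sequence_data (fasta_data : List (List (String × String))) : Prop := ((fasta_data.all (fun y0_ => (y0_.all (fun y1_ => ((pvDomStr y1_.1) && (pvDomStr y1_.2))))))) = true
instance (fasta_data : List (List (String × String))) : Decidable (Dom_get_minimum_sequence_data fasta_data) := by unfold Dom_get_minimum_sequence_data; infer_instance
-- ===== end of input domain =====

-- B replaces A's manual min-scan by a stable sort on sequence length and takes the front element.
-- ===== PORT A =====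
def get_minimum_sequence_data (fasta_data : List (List (String × String))) : List (String × String) :=
  let fasta_individual_minimum := PySem.List.pyGetD fasta_data 0 []
  let minimum_sequence_size := PySem.Str.len (PySem.Dict.getD (PySem.Dict.mk fasta_individual_minimum) "seq" "")
  (List.foldl
    (fun (st : List (String × String) × Int) i =>
      let fasta_individual_current := PySem.List.pyGetD fasta_data i []
      let current_sequence_size := PySem.Str.len (PySem.Dict.getD (PySem.Dict.mk fasta_individual_current) "seq" "")
      if current_sequence_size < st.2 then (fasta_individual_current, current_sequence_size) else st)
    (fasta_individual_minimum, minimum_sequence_size)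
    (PySem.List.pyRange 1 (fasta_data.length : Int) 1)).1

-- ===== PORT B =====
def get_minimum_sequence_data_alt (fasta_data : List (List (String × String))) : List (String × String) :=
  PySem.List.pyGetD
    (PySem.List.sorted fasta_data (fun entry => PySem.Str.len (PySem.Dict.getD (PySem.Dict.mk entry) "seq" "")) false)
    0 []

-- ===== PRECONDITION & SPEC =====
-- Pre_ excludes exactly where the Python A raises: the empty list (IndexError on fasta_data[0])
-- and any entry without a "seq" key (KeyError).
def Pre_get_minimum_sequence_data (fasta_data : List (List (String × String))) : Prop :=
  fasta_data ≠ [] ∧ ∀ e ∈ fasta_data, (PySem.Dict.get? (PySem.Dict.mk e) "seq").isSome = true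
instance (fasta_data : List (List (String × String))) : Decidable (Pre_get_minimum_sequence_data fasta_data) := by
  unfold Pre_get_minimum_sequence_data; infer_instance
def pvWitness_get_minimum_sequence_data : (List (List (String × String))) :=
  [[("seq", "ACGT"), ("id", "a")], [("seq", "AC")], [("seq", "GG")]]

def Spec_get_minimum_sequence_data (fasta_data : List (List (String × String))) (out : List (String × String)) : Prop := out = get_minimum_sequence_data_alt fasta_data
instance (fasta_data : List (List (String × String))) (out : List (String × String)) : Decidable (Spec_get_minimum_sequence_data fasta_data out) := by unfold Spec_get_minimum_sequence_data; infer_instance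

-- ===== CLAIM (what is proved, stated in full; the proofs are below) =====
def Claim_equal_get_minimum_sequence_data : Prop := ∀ (fasta_data : List (List (String × String))), Dom_get_minimum_sequence_data fasta_data → Pre_get_minimum_sequence_data fasta_data → Spec_get_minimum_sequence_data fasta_data (get_minimum_sequence_data fasta_data)

-- ===== LEMMAS AND PROOFS =====

-- A's paired (element, size) scan carries size = key of the element: it is the plain min-scan on elements
theorem pv_pair_scan {A : Type} (key : A → Int) (t : List A) :
    ∀ x : A,
    List.foldl (fun (st : A × Int) c =>
        if key c < st.2 then (c, key c) else st) (x, key x) t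
      = (List.foldl (fun m c => if key c < key m then c else m) x t,
         key (List.foldl (fun m c => if key c < key m then c else m) x t)) := by
  induction t with
  | nil => intro x; rfl
  | cons c t ih =>
      intro x
      by_cases h : key c < key x <;> simp [List.foldl, h, ih]

-- the head of the insertion-sort fold is the min-scan result (stability: strict '<' keeps the earliest)
theorem pv_sort_head {A : Type} (key : A → Int) (t : List A) :
    ∀ (a : A) (r : List A),
    ∃ r', List.foldl (fun acc x => PySem.List.insertBy (fun u v => decide (key u < key v)) x acc)
            (a :: r) t
          = (List.foldl (fun m c => if key c < key m then c else m) a t) :: r' := by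
  induction t with
  | nil => intro a r; exact ⟨r, rfl⟩
  | cons c t ih =>
      intro a r
      by_cases h : key c < key a
      · obtain ⟨r', hr⟩ := ih c (a :: r)
        refine ⟨r', ?_⟩
        simpa [List.foldl, PySem.List.insertBy, h] using hr
      · obtain ⟨r', hr⟩ := ih a (PySem.List.insertBy (fun u v => decide (key u < key v)) c r)
        refine ⟨r', ?_⟩
        simpa [List.foldl, PySem.List.insertBy, h] using hr

-- ===== VERDICT (by name: the statement is the Claim_ definition above) =====
theorem get_minimum_sequence_data_spec : Claim_equal_get_minimum_sequence_data := by
  intro fasta_data _ hpre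
  obtain ⟨hne, -⟩ := hpre
  obtain ⟨x, t, rfl⟩ := List.exists_cons_of_ne_nil hne
  unfold Spec_get_minimum_sequence_data get_minimum_sequence_data get_minimum_sequence_data_alt
  dsimp only
  rw [PySem.List.foldl_pyRange_pyGetD' (x :: t) []
        (fun (st : List (String × String) × Int) c =>
          if PySem.Str.len (PySem.Dict.getD (PySem.Dict.mk c) "seq" "") < st.2
          then (c, PySem.Str.len (PySem.Dict.getD (PySem.Dict.mk c) "seq" "")) else st)
        _ (by norm_num)]
  rw [PySem.List.sorted_eq_foldl_insertBy]
  have hA := pv_pair_scan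
    (fun e => PySem.Str.len (PySem.Dict.getD (PySem.Dict.mk e) "seq" "")) t
    (PySem.List.pyGetD (x :: t) 0 [])
  obtain ⟨r', hr⟩ := pv_sort_head
    (fun e => PySem.Str.len (PySem.Dict.getD (PySem.Dict.mk e) "seq" "")) t x []
  simp only [PySem.List.pyGetD_zero, List.getD_cons_zero, Int.toNat_one, List.drop_one,
    List.tail_cons, List.foldl_cons, PySem.List.insertBy] at hA hr ⊢
  rw [hr, List.getD_cons_zero]
  exact congrArg Prod.fst hA
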